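-- pv_equiv track=rewrite | github.com/acollin19/skimage | mountain.py | get_min_elevation_route
-- ===== SOURCE A (Python) =====
-- def get_min_elevation_route(routes):
--
--     elevation_change=[]
-- # For each tuple in the list(routes), take the elevation change so the second element of the tuple
-- # and append each of those values into a list of all elevation changes.
--     for tuples in routes:
--         elevation_change.append(tuples[1])
-- # Then take the min value from the list and if the tuples in routs at the second index is
-- # the same as the elevation change, then return the tuple
--     smallest_elevation=min(elevation_change)
--     for tuples in routes:
--         if tuples[1]==smallest_elevation:
--             return tuples
-- ===== SOURCE B (Python) =====
-- def get_min_elevation_route(routes):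
--     best = routes[0]
--     for t in routes[1:]:
--         if t[1] < best[1]:
--             best = t
--     return best
-- ===== Notes on version B (the rewrite author's own statement) =====
-- stated objective: simpler
-- what changed: One-pass loop tracking the current best tuple replaces A's two passes (build a list of all second elements, take its min, then rescan for the first matching tuple); the intermediate list disappears.
import Mathlib
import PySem

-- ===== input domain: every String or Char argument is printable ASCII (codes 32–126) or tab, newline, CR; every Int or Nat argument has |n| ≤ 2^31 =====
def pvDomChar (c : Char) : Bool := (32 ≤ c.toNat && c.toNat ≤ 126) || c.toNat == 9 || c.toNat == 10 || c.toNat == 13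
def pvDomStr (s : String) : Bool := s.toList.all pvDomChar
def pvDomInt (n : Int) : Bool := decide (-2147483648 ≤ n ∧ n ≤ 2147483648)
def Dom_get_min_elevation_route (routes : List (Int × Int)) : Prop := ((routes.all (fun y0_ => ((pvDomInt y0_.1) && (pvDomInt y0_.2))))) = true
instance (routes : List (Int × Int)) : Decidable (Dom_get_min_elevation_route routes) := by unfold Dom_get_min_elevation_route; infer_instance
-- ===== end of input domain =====

-- B replaces A's two passes (collect all second elements, min, rescan for first match)
-- by one loop tracking the current best tuple: simpler, same result on non-empty input.


-- ===== PORT A =====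
def get_min_elevation_route (routes : List (Int × Int)) : Int × Int :=
  let elevation_change := routes.foldl (fun acc t => acc ++ [t.2]) []
  match PySem.List.min? elevation_change (fun y => y) with
  | none => (0, 0)  -- min([]) raises ValueError in Python; excluded by Pre_
  | some smallest =>
      -- second loop: return the first tuple whose second element equals the min
      -- (a match always exists when routes ≠ []; Python would return None otherwise)
      (routes.find? (fun t => t.2 == smallest)).getD (0, 0)

-- ===== PORT B =====
def get_min_elevation_route_alt (routes : List (Int × Int)) : Int × Int :=
  match routes with
  | [] => (0, 0)  -- routes[0] raises IndexError in Python; excluded by Pre_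
  | h :: t => t.foldl (fun best x => if x.2 < best.2 then x else best) h

-- ===== PRECONDITION & SPEC =====
-- A raises ValueError (min of empty list) on [], B raises IndexError there.
def Pre_get_min_elevation_route (routes : List (Int × Int)) : Prop := routes ≠ []
instance (routes : List (Int × Int)) : Decidable (Pre_get_min_elevation_route routes) := by unfold Pre_get_min_elevation_route; infer_instance
def pvWitness_get_min_elevation_route : (List (Int × Int)) := [(1, 5), (2, 3), (3, 3)]

def Spec_get_min_elevation_route (routes : List (Int × Int)) (out : Int × Int) : Prop := out = get_min_elevation_route_alt routes
instance (routes : List (Int × Int)) (out : Int × Int) : Decidable (Spec_get_min_elevation_route routes out) := by unfold Spec_get_min_elevation_route; infer_instance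

-- ===== CLAIM (what is proved, stated in full; the proofs are below) =====
def Claim_equal_get_min_elevation_route : Prop := ∀ (routes : List (Int × Int)), Dom_get_min_elevation_route routes → Pre_get_min_elevation_route routes → Spec_get_min_elevation_route routes (get_min_elevation_route routes)

-- ===== LEMMAS AND PROOFS =====

-- B's loop body, named for the lemmas
def pvStep (best x : Int × Int) : Int × Int := if x.2 < best.2 then x else best

-- the first pass of A builds the list of second elements
theorem pvChanges_eq (routes : List (Int × Int)) (acc : List Int) :
    routes.foldl (fun acc t => acc ++ [t.2]) acc = acc ++ routes.map Prod.snd := by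
  induction routes generalizing acc with
  | nil => simp
  | cons h t ih => simp [List.foldl, ih]

-- the second component of B's running best is the running min of the seconds
theorem pvBest_snd (h : Int × Int) (t : List (Int × Int)) :
    (t.foldl pvStep h).2 = (t.map Prod.snd).foldl min h.2 := by
  induction t generalizing h with
  | nil => rfl
  | cons x rest ih =>
      simp only [List.foldl, List.map, ih]
      congr 1
      simp only [pvStep]
      split <;> omega

-- B's running best only changes to a strictly smaller second element
theorem pvBest_cases (h : Int × Int) (t : List (Int × Int)) :
    t.foldl pvStep h = h ∨ (t.foldl pvStep h).2 < h.2 := by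
  induction t generalizing h with
  | nil => exact Or.inl rfl
  | cons x rest ih =>
      simp only [List.foldl, pvStep]
      split
      next hx =>
        rcases ih (h := x) with h1 | h1
        · rw [h1]; right; exact hx
        · right; omega
      next hx => exact ih h

-- the first tuple whose second equals the best's second IS the best
theorem pvFind_best (h : Int × Int) (t : List (Int × Int)) :
    (h :: t).find? (fun p => p.2 == (t.foldl pvStep h).2) = some (t.foldl pvStep h) := by
  induction t generalizing h with
  | nil => simp [List.find?]
  | cons x rest ih =>
      simp only [List.foldl]
      by_cases hx : x.2 < h.2
      · have hstep : pvStep h x = x := by simp [pvStep, hx]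
        rw [hstep]
        have hlt : (rest.foldl pvStep x).2 < h.2 := by
          rcases pvBest_cases x rest with h1 | h1
          · rw [h1]; exact hx
          · omega
        have : (h.2 == (rest.foldl pvStep x).2) = false := by
          simp; omega
        rw [List.find?_cons_of_neg (by simp; omega)]
        exact ih x
      · have hstep : pvStep h x = h := by simp [pvStep, hx]
        rw [hstep]
        rcases pvBest_cases h rest with h1 | h1
        · rw [h1]
          simp [List.find?]
        · have hhx : ¬ (h.2 == (rest.foldl pvStep h).2) := by simp; omega
          rw [List.find?_cons_of_neg (by simpa using hhx)]
          have hxx : ¬ (x.2 == (rest.foldl pvStep h).2) := by simp; omega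
          rw [List.find?_cons_of_neg (by simpa using hxx)]
          have := ih h
          rw [List.find?_cons_of_neg (by simpa using hhx)] at this
          exact this

-- ===== VERDICT (by name: the statement is the Claim_ definition above) =====
theorem get_min_elevation_route_spec : Claim_equal_get_min_elevation_route := by
  intro routes _ hpre
  unfold Spec_get_min_elevation_route
  match routes with
  | [] => exact absurd rfl hpre
  | h :: t =>
      show get_min_elevation_route (h :: t) = _
      unfold get_min_elevation_route get_min_elevation_route_alt
      rw [pvChanges_eq]
      simp only [List.nil_append, List.map]
      rw [PySem.List.min?_id_cons]
      have hmin : (t.map Prod.snd).foldl min h.2 = (t.foldl pvStep h).2 := (pvBest_snd h t).symm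
      rw [hmin]
      show (List.find? (fun p => p.2 == (List.foldl pvStep h t).2) (h :: t)).getD (0, 0) =
        List.foldl (fun best x => if x.2 < best.2 then x else best) h t
      rw [pvFind_best h t]
      rfl
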